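-- pv_equiv track=rewrite | github.com/Lawes/adventofcode | 2023/day03/day.py | next_num
-- ===== SOURCE A (Python) =====
-- def isempty(c):
--     return c == ''
--
-- def isnum(c):
--     return not isempty(c) and '0' <= c <= '9'
--
-- def issympbol(c):
--     return not isempty(c) and not isnum(c)
--
-- def next_num(state, x0, y0, grid):
--     # state: current_num, voisins
--     endx = x0 + 1
--     if not isnum(grid[(x0, y0)]):
--         return state, endx
--
--     current, voisins = state
--     current += grid[(x0, y0)]
--     for dx, dy in [(-1, -1), (-1, 1), (-1, 0), (0, 1), (0, -1), (1, -1), (1, 1)]: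
--         xx = x0 + dx
--         yy = y0 + dy
--         v = grid[(xx, yy)]
--         if issympbol(v):
--             voisins.append((xx, yy))
--
--     endv = grid[(endx, y0)]
--     if isnum(endv):
--         return next_num((current, voisins), endx, y0, grid)
--     elif issympbol(endv):
--         voisins.append((endx, y0))
--         endx += 1
--
--     return (current, voisins), endx
-- ===== SOURCE B (Python) =====
-- def isempty(c):
--     return c == ''
--
-- def isnum(c):
--     return not isempty(c) and '0' <= c <= '9'
--
-- def issympbol(c):
--     return not isempty(c) and not isnum(c)
--
-- # Two-phase rewrite: first scan right to find the end of the digit run,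
-- # then build the number string and collect symbol neighbours over the run.
-- def next_num(state, x0, y0, grid):
--     if not isnum(grid[(x0, y0)]):
--         return state, x0 + 1
--     e = x0 + 1
--     while isnum(grid[(e, y0)]):
--         e += 1
--     current, voisins = state
--     current = current + ''.join(grid[(x, y0)] for x in range(x0, e))
--     for x in range(x0, e):
--         for dx, dy in [(-1, -1), (-1, 1), (-1, 0), (0, 1), (0, -1), (1, -1), (1, 1)]:
--             v = grid[(x + dx, y0 + dy)]
--             if issympbol(v):
--                 voisins.append((x + dx, y0 + dy))
--     if issympbol(grid[(e, y0)]):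
--         voisins.append((e, y0))
--         return (current, voisins), e + 1
--     return (current, voisins), e
-- ===== Notes on version B (the rewrite author's own statement) =====
-- stated objective: alternative
-- what changed: A's tail recursion that interleaves digit collection, neighbour collection and the run-end decision at every cell is replaced by a two-phase pass: a simple while-loop first finds the end of the digit run, then the number string and the symbol-neighbour list are built in one sweep over the known run; Pre_ excludes exactly the inputs where the Python raises KeyError on a missing grid cell.
import Mathlib
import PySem

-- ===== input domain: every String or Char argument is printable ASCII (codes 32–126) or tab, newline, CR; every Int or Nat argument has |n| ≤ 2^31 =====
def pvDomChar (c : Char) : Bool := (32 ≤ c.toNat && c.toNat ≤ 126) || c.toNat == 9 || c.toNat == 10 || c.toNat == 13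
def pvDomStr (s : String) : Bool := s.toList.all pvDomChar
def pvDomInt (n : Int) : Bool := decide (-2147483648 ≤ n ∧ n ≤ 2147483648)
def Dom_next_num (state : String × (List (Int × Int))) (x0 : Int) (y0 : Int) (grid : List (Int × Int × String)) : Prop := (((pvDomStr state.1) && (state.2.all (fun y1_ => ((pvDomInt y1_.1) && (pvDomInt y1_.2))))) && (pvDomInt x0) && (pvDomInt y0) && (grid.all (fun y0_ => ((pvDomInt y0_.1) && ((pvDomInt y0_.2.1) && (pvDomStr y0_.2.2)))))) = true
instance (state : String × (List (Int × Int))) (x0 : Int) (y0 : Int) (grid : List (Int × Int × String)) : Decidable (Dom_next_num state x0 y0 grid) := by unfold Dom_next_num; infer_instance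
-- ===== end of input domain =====

-- B replaces A's interleaved tail recursion by a two-phase pass (find the digit-run end, then
-- build the string and neighbour list over the run); return values agree, equivalence is about
-- the return value (both Pythons mutate state's voisins list in place with the same appends).

-- shared module helpers (isempty/isnum/issympbol of the Python module; dict lookup of grid)
def gv (grid : List (Int × Int × String)) (x y : Int) : Option String :=
  (grid.find? (fun e => e.1 == x && e.2.1 == y)).map (fun e => e.2.2)

-- grid[(x,y)]; a missing key is Python's KeyError, excluded by Pre_ (the "" default is never hit there)
def gvD (grid : List (Int × Int × String)) (x y : Int) : String :=
  (gv grid x y).getD ""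

def pyIsempty (c : String) : Bool := c.toList == []

-- '0' <= c <= '9': Python's lexicographic string ≤, as ¬(<) on the code-point lists (a ≤ b ↔ ¬ b < a)
def pyIsnum (c : String) : Bool :=
  !(pyIsempty c) && (!decide (c.toList < ("0" : String).toList) && !decide (("9" : String).toList < c.toList))

def pyIssym (c : String) : Bool := !(pyIsempty c) && !(pyIsnum c)

def deltas : List (Int × Int) := [(-1, -1), (-1, 1), (-1, 0), (0, 1), (0, -1), (1, -1), (1, 1)]

-- ===== PORT A =====
-- fuel only makes the recursion total; under Pre_ it never runs out (each step consumes a distinct grid key)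
def nextNumA : Nat → (String × (List (Int × Int))) → Int → Int → List (Int × Int × String) → (String × (List (Int × Int))) × Int
  | 0, state, x0, _, _ => (state, x0 + 1)
  | fuel + 1, state, x0, y0, grid =>
    let endx := x0 + 1
    if ¬ (pyIsnum (gvD grid x0 y0) = true) then (state, endx)
    else
      let current := state.1 ++ gvD grid x0 y0
      let voisins := deltas.foldl (fun vs d =>
        if pyIssym (gvD grid (x0 + d.1) (y0 + d.2)) then vs ++ [(x0 + d.1, y0 + d.2)] else vs) state.2
      let endv := gvD grid endx y0
      if pyIsnum endv then nextNumA fuel (current, voisins) endx y0 grid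
      else if pyIssym endv then ((current, voisins ++ [(endx, y0)]), endx + 1)
      else ((current, voisins), endx)

def next_num (state : String × (List (Int × Int))) (x0 : Int) (y0 : Int) (grid : List (Int × Int × String)) : (String × (List (Int × Int))) × Int :=
  nextNumA (grid.length + 1) state x0 y0 grid

-- ===== PORT B =====
-- phase 1: the while loop scanning right for the end of the digit run (fuel = totality only)
def runEnd : Nat → List (Int × Int × String) → Int → Int → Int
  | 0, _, e, _ => e
  | fuel + 1, grid, e, y0 => if pyIsnum (gvD grid e y0) then runEnd fuel grid (e + 1) y0 else e

def next_num_alt (state : String × (List (Int × Int))) (x0 : Int) (y0 : Int) (grid : List (Int × Int × String)) : (String × (List (Int × Int))) × Int :=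
  if ¬ (pyIsnum (gvD grid x0 y0) = true) then (state, x0 + 1)
  else
    let e := runEnd (grid.length + 1) grid (x0 + 1) y0
    -- phase 2: current + ''.join(...) and the neighbour-collecting double loop over the run
    let current := state.1 ++ (PySem.List.pyRange x0 e 1).foldl (fun s x => s ++ gvD grid x y0) ""
    let voisins := (PySem.List.pyRange x0 e 1).foldl (fun vs x =>
        deltas.foldl (fun vs d =>
          if pyIssym (gvD grid (x + d.1) (y0 + d.2)) then vs ++ [(x + d.1, y0 + d.2)] else vs) vs) state.2
    if pyIssym (gvD grid e y0) then ((current, voisins ++ [(e, y0)]), e + 1)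
    else ((current, voisins), e)

-- ===== PRECONDITION & SPEC =====
-- Pre_ = exactly the inputs on which Python A returns (no KeyError): the start cell exists, and if it
-- is a digit then the whole digit run, every neighbour cell of the run, and the cell ending the run exist.
def Pre_next_num (state : String × (List (Int × Int))) (x0 : Int) (y0 : Int) (grid : List (Int × Int × String)) : Prop :=
  (gv grid x0 y0).isSome = true ∧
  (pyIsnum (gvD grid x0 y0) = true →
    ∃ k ∈ List.range (grid.length + 1),
      (∀ j ∈ List.range (k + 1),
        pyIsnum (gvD grid (x0 + (j : Int)) y0) = true ∧
        ∀ d ∈ deltas, (gv grid (x0 + (j : Int) + d.1) (y0 + d.2)).isSome = true) ∧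
      pyIsnum (gvD grid (x0 + (k : Int) + 1) y0) = false ∧
      (gv grid (x0 + (k : Int) + 1) y0).isSome = true)

instance (state : String × (List (Int × Int))) (x0 : Int) (y0 : Int) (grid : List (Int × Int × String)) : Decidable (Pre_next_num state x0 y0 grid) := by unfold Pre_next_num; infer_instance

def pvWitness_next_num : (String × (List (Int × Int))) × Int × Int × (List (Int × Int × String)) :=
  (("", []), 0, 0, [(0, 0, "*")])

def Spec_next_num (state : String × (List (Int × Int))) (x0 : Int) (y0 : Int) (grid : List (Int × Int × String)) (out : (String × (List (Int × Int))) × Int) : Prop := out = next_num_alt state x0 y0 grid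
instance (state : String × (List (Int × Int))) (x0 : Int) (y0 : Int) (grid : List (Int × Int × String)) (out : (String × (List (Int × Int))) × Int) : Decidable (Spec_next_num state x0 y0 grid out) := by unfold Spec_next_num; infer_instance

-- ===== CLAIM (what is proved, stated in full; the proofs are below) =====
def Claim_equal_next_num : Prop := ∀ (state : String × (List (Int × Int))) (x0 : Int) (y0 : Int) (grid : List (Int × Int × String)), Dom_next_num state x0 y0 grid → Pre_next_num state x0 y0 grid → Spec_next_num state x0 y0 grid (next_num state x0 y0 grid)

-- ===== LEMMAS AND PROOFS =====

-- symbol neighbours of cell (x, y0), in delta order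
def njoin (grid : List (Int × Int × String)) (y0 x : Int) : List (Int × Int) :=
  (deltas.filter (fun d => pyIssym (gvD grid (x + d.1) (y0 + d.2)))).map (fun d => (x + d.1, y0 + d.2))

def strcat (grid : List (Int × Int × String)) (y0 a b : Int) : String :=
  (PySem.List.pyRange a b 1).foldl (fun s x => s ++ gvD grid x y0) ""

-- the common "finished" value both ports produce once the run [x0, e) is known
def finish (grid : List (Int × Int × String)) (y0 : Int) (state : String × (List (Int × Int))) (x0 e : Int) : (String × (List (Int × Int))) × Int :=
  let current := state.1 ++ strcat grid y0 x0 e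
  let voisins := state.2 ++ (PySem.List.pyRange x0 e 1).flatMap (njoin grid y0)
  if pyIssym (gvD grid e y0) then ((current, voisins ++ [(e, y0)]), e + 1)
  else ((current, voisins), e)

lemma nbfold_eq (grid : List (Int × Int × String)) (y0 x : Int) (vs : List (Int × Int)) :
    deltas.foldl (fun vs d =>
      if pyIssym (gvD grid (x + d.1) (y0 + d.2)) then vs ++ [(x + d.1, y0 + d.2)] else vs) vs
    = vs ++ njoin grid y0 x := by
  unfold njoin
  exact PySem.List.foldl_append_if _ _ _ _

lemma foldl_str_append (f : Int → String) : ∀ (l : List Int) (s t : String),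
    l.foldl (fun a x => a ++ f x) (s ++ t) = s ++ l.foldl (fun a x => a ++ f x) t := by
  intro l
  induction l with
  | nil => intro s t; rfl
  | cons a l ih =>
    intro s t
    simp only [List.foldl_cons, String.append_assoc]
    exact ih s (t ++ f a)

lemma strcat_cons (grid : List (Int × Int × String)) (y0 a b : Int) (h : a < b) :
    strcat grid y0 a b = gvD grid a y0 ++ strcat grid y0 (a + 1) b := by
  unfold strcat
  rw [PySem.List.pyRange_one_cons h]
  simp only [List.foldl_cons]
  have : ("" : String) ++ gvD grid a y0 = gvD grid a y0 ++ "" := by simp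
  rw [this, foldl_str_append]

lemma finish_step (grid : List (Int × Int × String)) (y0 : Int)
    (state : String × (List (Int × Int))) (x0 e : Int) (h : x0 < e) :
    finish grid y0 state x0 e
      = finish grid y0 (state.1 ++ gvD grid x0 y0, state.2 ++ njoin grid y0 x0) (x0 + 1) e := by
  unfold finish
  rw [PySem.List.pyRange_one_cons h, strcat_cons grid y0 x0 e h]
  simp [String.append_assoc, List.append_assoc]

lemma runEnd_eq (grid : List (Int × Int × String)) (y0 : Int) :
    ∀ (k fuel : Nat) (x : Int), k < fuel →
    (∀ j : Nat, j < k → pyIsnum (gvD grid (x + (j : Int)) y0) = true) →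
    pyIsnum (gvD grid (x + (k : Int)) y0) = false →
    runEnd fuel grid x y0 = x + (k : Int) := by
  intro k
  induction k with
  | zero =>
    intro fuel x hf _ hend
    match fuel, hf with
    | fuel + 1, _ =>
      simp only [runEnd]
      simp only [Nat.cast_zero, add_zero] at hend ⊢
      simp [hend]
  | succ k ih =>
    intro fuel x hf hdig hend
    match fuel, hf with
    | fuel + 1, hf =>
      simp only [runEnd]
      have h0 : pyIsnum (gvD grid x y0) = true := by
        have := hdig 0 (Nat.succ_pos k); simpa using this
      rw [h0]
      simp only [if_true]
      have := ih fuel (x + 1) (by omega)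
        (fun j hj => by
          have := hdig (j + 1) (by omega)
          rw [show x + 1 + (j : Int) = x + ((j : Nat) + 1 : Int) by ring]
          simpa using this)
        (by
          rw [show x + 1 + (k : Int) = x + ((k : Nat) + 1 : Int) by ring]
          simpa using hend)
      rw [this]; push_cast; ring

lemma nextNumA_eq (grid : List (Int × Int × String)) (y0 : Int) :
    ∀ (k fuel : Nat) (state : String × (List (Int × Int))) (x0 : Int), k < fuel →
    (∀ j : Nat, j ≤ k → pyIsnum (gvD grid (x0 + (j : Int)) y0) = true) →
    pyIsnum (gvD grid (x0 + (k : Int) + 1) y0) = false →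
    nextNumA fuel state x0 y0 grid = finish grid y0 state x0 (x0 + (k : Int) + 1) := by
  intro k
  induction k with
  | zero =>
    intro fuel state x0 hf hdig hend
    match fuel, hf with
    | fuel + 1, _ =>
      have h0 : pyIsnum (gvD grid x0 y0) = true := by simpa using hdig 0 (le_refl 0)
      have hend' : pyIsnum (gvD grid (x0 + 1) y0) = false := by simpa using hend
      simp only [nextNumA, h0, not_true, if_false, hend', Bool.false_eq_true]
      rw [nbfold_eq]
      simp only [Nat.cast_zero, add_zero]
      unfold finish
      have he : strcat grid y0 x0 (x0 + 1) = gvD grid x0 y0 := by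
        rw [strcat_cons grid y0 x0 (x0 + 1) (by omega)]
        unfold strcat
        rw [PySem.List.pyRange_one_eq_nil (by omega)]
        simp
      rw [PySem.List.pyRange_one_cons (show x0 < x0 + 1 by omega),
        PySem.List.pyRange_one_eq_nil (show x0 + 1 ≤ x0 + 1 by omega)]
      simp [he]
  | succ k ih =>
    intro fuel state x0 hf hdig hend
    match fuel, hf with
    | fuel + 1, hf =>
      have h0 : pyIsnum (gvD grid x0 y0) = true := by simpa using hdig 0 (Nat.zero_le _)
      have h1 : pyIsnum (gvD grid (x0 + 1) y0) = true := by
        have := hdig 1 (by omega); simpa using this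
      simp only [nextNumA, h0, not_true, if_false, h1, if_true]
      rw [nbfold_eq]
      have hrec := ih fuel (state.1 ++ gvD grid x0 y0, state.2 ++ njoin grid y0 x0) (x0 + 1)
        (by omega)
        (fun j hj => by
          have := hdig (j + 1) (by omega)
          rw [show x0 + 1 + (j : Int) = x0 + ((j : Nat) + 1 : Int) by ring]
          simpa using this)
        (by
          rw [show x0 + 1 + (k : Int) + 1 = x0 + ((k : Nat) + 1 : Int) + 1 by ring]
          simpa using hend)
      rw [hrec]
      have hee : x0 + 1 + (k : Int) + 1 = x0 + ((k + 1 : Nat) : Int) + 1 := by push_cast; ring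
      rw [hee]
      have hlt : x0 < x0 + ((k + 1 : Nat) : Int) + 1 := by push_cast; omega
      exact (finish_step grid y0 state x0 _ hlt).symm

lemma next_num_alt_run (state : String × (List (Int × Int))) (x0 y0 : Int)
    (grid : List (Int × Int × String)) (k : Nat)
    (h0 : pyIsnum (gvD grid x0 y0) = true)
    (hk : k < grid.length + 1)
    (hdig : ∀ j : Nat, j ≤ k → pyIsnum (gvD grid (x0 + (j : Int)) y0) = true)
    (hend : pyIsnum (gvD grid (x0 + (k : Int) + 1) y0) = false) :
    next_num_alt state x0 y0 grid = finish grid y0 state x0 (x0 + (k : Int) + 1) := by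
  unfold next_num_alt
  rw [if_neg (by simpa using h0)]
  have hrun : runEnd (grid.length + 1) grid (x0 + 1) y0 = x0 + (k : Int) + 1 := by
    have := runEnd_eq grid y0 k (grid.length + 1) (x0 + 1) hk
      (fun j hj => by
        have := hdig (j + 1) (by omega)
        rw [show x0 + 1 + (j : Int) = x0 + ((j : Nat) + 1 : Int) by ring]
        simpa using this)
      (by rw [show x0 + 1 + (k : Int) = x0 + (k : Int) + 1 by ring]; exact hend)
    rw [this]; ring
  rw [hrun]
  have houter : ∀ (l : List Int) (vs : List (Int × Int)),
      l.foldl (fun vs x => deltas.foldl (fun vs d =>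
        if pyIssym (gvD grid (x + d.1) (y0 + d.2)) then vs ++ [(x + d.1, y0 + d.2)] else vs) vs) vs
      = vs ++ l.flatMap (njoin grid y0) := by
    intro l vs
    have : (fun (vs : List (Int × Int)) (x : Int) => deltas.foldl (fun vs d =>
        if pyIssym (gvD grid (x + d.1) (y0 + d.2)) then vs ++ [(x + d.1, y0 + d.2)] else vs) vs)
        = fun vs x => vs ++ njoin grid y0 x := by
      funext vs x; exact nbfold_eq grid y0 x vs
    rw [this]
    exact PySem.List.foldl_append_eq_flatMap _ _ _
  simp only [houter]
  rfl

-- ===== VERDICT (by name: the statement is the Claim_ definition above) =====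
theorem next_num_spec : Claim_equal_next_num := by
  intro state x0 y0 grid _ hpre
  unfold Spec_next_num
  obtain ⟨hsome, hrun⟩ := hpre
  by_cases h0 : pyIsnum (gvD grid x0 y0) = true
  · obtain ⟨k, hkmem, hdig, hend, _⟩ := hrun h0
    have hk : k < grid.length + 1 := List.mem_range.mp hkmem
    have hdig' : ∀ j : Nat, j ≤ k → pyIsnum (gvD grid (x0 + (j : Int)) y0) = true := by
      intro j hj
      exact (hdig j (List.mem_range.mpr (by omega))).1
    rw [next_num_alt_run state x0 y0 grid k h0 hk hdig' hend]
    unfold next_num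
    exact nextNumA_eq grid y0 k (grid.length + 1) state x0 hk hdig' hend
  · unfold next_num next_num_alt
    simp only [nextNumA, h0]
    simp
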